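-- pv_equiv track=rewrite | github.com/DoubleJONY/KDJ-algorithm-challenge | heoh/programmers-42840.py | solution
-- ===== SOURCE A (Python) =====
-- from typing import List
--
-- def pattern_generator(pattern: List[int]):
--     while True:
--         for x in pattern:
--             yield x
--
-- def generate_answer(pattern: List[int], n: int):
--     generator = pattern_generator(pattern)
--     return [next(generator) for _ in range(n)]
--
-- def get_score(submission: List[int], answers: List[int]):
--     corrects = [s == a for s, a in zip(submission, answers)]
--     return corrects.count(True)
--
-- def solution(answers: List[int]):
--     patterns = {
--         1: [1, 2, 3, 4, 5],
--         2: [2, 1, 2, 3, 2, 4, 2, 5],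
--         3: [3, 3, 1, 1, 2, 2, 4, 4, 5, 5],
--     }
--
--     submissions = {i: generate_answer(p, len(answers)) for i, p in patterns.items()}
--     scores = {i: get_score(s, answers) for i, s in submissions.items()}
--
--     max_score = max(scores.values())
--     answer = [i for i, v in scores.items() if v == max_score]
--
--     return answer
-- ===== SOURCE B (Python) =====
-- from typing import List
--
-- def solution(answers: List[int]):
--     p1 = [1, 2, 3, 4, 5]
--     p2 = [2, 1, 2, 3, 2, 4, 2, 5]
--     p3 = [3, 3, 1, 1, 2, 2, 4, 4, 5, 5]
--     c1 = c2 = c3 = 0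
--     for i, a in enumerate(answers):
--         if a == p1[i % 5]:
--             c1 += 1
--         if a == p2[i % 8]:
--             c2 += 1
--         if a == p3[i % 10]:
--             c3 += 1
--     m = max(c1, c2, c3)
--     res = []
--     if c1 == m:
--         res.append(1)
--     if c2 == m:
--         res.append(2)
--     if c3 == m:
--         res.append(3)
--     return res
-- ===== Notes on version B (the rewrite author's own statement) =====
-- stated objective: faster
-- what changed: Replaced the generator-based materialization of three full submission lists plus zip-based scoring and dict comprehensions by a single enumerate pass keeping three integer counters indexed modulo the pattern lengths, then an append-built result list (O(1) extra space, no intermediate lists).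
import Mathlib
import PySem

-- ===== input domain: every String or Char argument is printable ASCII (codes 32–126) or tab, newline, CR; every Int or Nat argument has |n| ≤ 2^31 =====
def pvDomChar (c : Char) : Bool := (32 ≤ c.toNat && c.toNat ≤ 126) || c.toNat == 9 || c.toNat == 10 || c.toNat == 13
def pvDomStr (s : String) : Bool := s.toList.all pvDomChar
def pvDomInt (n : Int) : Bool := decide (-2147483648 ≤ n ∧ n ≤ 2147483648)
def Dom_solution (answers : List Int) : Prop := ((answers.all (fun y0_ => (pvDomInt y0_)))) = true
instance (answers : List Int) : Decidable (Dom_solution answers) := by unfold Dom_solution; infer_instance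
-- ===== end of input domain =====

-- B replaces A's materialized submission lists / dict comprehensions by one enumerate pass with
-- three counters (simpler, O(1) extra space); same return value everywhere.

-- ===== PORT A =====
-- generate_answer: the cycling generator consumed n times is the pattern repeated by index mod length
def generate_answer (pattern : List Int) (n : Int) : List Int :=
  (PySem.List.pyRange 0 n 1).map
    (fun i => PySem.List.pyGetD pattern (PySem.Int.mod i (pattern.length : Int)) 0)

def get_score (submission : List Int) (answers : List Int) : Int :=
  (((submission.zip answers).map (fun sa => sa.1 == sa.2)).count true : Nat)

def solution (answers : List Int) : List Int :=
  let patterns : List (Int × List Int) :=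
    [(1, [1, 2, 3, 4, 5]), (2, [2, 1, 2, 3, 2, 4, 2, 5]), (3, [3, 3, 1, 1, 2, 2, 4, 4, 5, 5])]
  let submissions := patterns.map (fun ip => (ip.1, generate_answer ip.2 (answers.length : Int)))
  let scores := submissions.map (fun is => (is.1, get_score is.2 answers))
  let maxScore := ((scores.map (·.2)).max?).getD 0
  (scores.filter (fun iv => iv.2 == maxScore)).map (·.1)

-- ===== PORT B =====
def solution_alt (answers : List Int) : List Int :=
  let p1 : List Int := [1, 2, 3, 4, 5]
  let p2 : List Int := [2, 1, 2, 3, 2, 4, 2, 5]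
  let p3 : List Int := [3, 3, 1, 1, 2, 2, 4, 4, 5, 5]
  let c := (PySem.List.enumerate answers 0).foldl
    (fun (c : Int × Int × Int) ia =>
      ((if ia.2 == PySem.List.pyGetD p1 (PySem.Int.mod ia.1 5) 0 then c.1 + 1 else c.1),
       (if ia.2 == PySem.List.pyGetD p2 (PySem.Int.mod ia.1 8) 0 then c.2.1 + 1 else c.2.1),
       (if ia.2 == PySem.List.pyGetD p3 (PySem.Int.mod ia.1 10) 0 then c.2.2 + 1 else c.2.2)))
    (0, 0, 0)
  let m := max c.1 (max c.2.1 c.2.2)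
  (if c.1 == m then [1] else []) ++ (if c.2.1 == m then [2] else []) ++
    (if c.2.2 == m then [3] else [])

-- ===== PRECONDITION & SPEC =====
def Spec_solution (answers : List Int) (out : List Int) : Prop := out = solution_alt answers
instance (answers : List Int) (out : List Int) : Decidable (Spec_solution answers out) := by unfold Spec_solution; infer_instance

-- ===== CLAIM (what is proved, stated in full; the proofs are below) =====
def Claim_equal_solution : Prop := ∀ (answers : List Int), Dom_solution answers → Spec_solution answers (solution answers)

-- ===== LEMMAS AND PROOFS =====

-- reference count: matches of xs against pattern p cycling from position k
def scoreA (p : List Int) : List Int → Nat → Nat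
  | [], _ => 0
  | a :: xs, k =>
    (if a == PySem.List.pyGetD p (((k % p.length : Nat) : Int)) 0 then 1 else 0) + scoreA p xs (k + 1)

-- A's zip/count score over the cycled pattern, generalized to start position k
theorem countA_eq_scoreA (p : List Int) (xs : List Int) : ∀ (k : Nat),
    ((((List.range' k xs.length).map
        (fun i => PySem.List.pyGetD p (((i % p.length : Nat) : Int)) 0)).zip xs).map
      (fun sa => sa.1 == sa.2)).count true = scoreA p xs k := by
  induction xs with
  | nil => intro k; simp [scoreA]
  | cons a t ih =>
    intro k
    simp only [List.length_cons, List.range'_succ, List.map_cons, List.zip_cons_cons,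
      List.count_cons, ih, scoreA]
    rcases eq_or_ne (PySem.List.pyGetD p (((k % p.length : Nat) : Int)) 0) a with h | h
    · subst h; simp [Nat.add_comm]
    · push_cast at h; simp [h, Ne.symm h]

-- generate_answer is index-mod-length over range
theorem generate_answer_eq (p : List Int) (xs : List Int) :
    generate_answer p (xs.length : Int) =
      (List.range' 0 xs.length).map
        (fun i => PySem.List.pyGetD p (((i % p.length : Nat) : Int)) 0) := by
  unfold generate_answer
  rw [PySem.List.pyRange_zero_nat, List.map_map, ← List.range_eq_range']
  refine List.map_congr_left ?_
  intro k hk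
  simp

theorem get_score_eq (p : List Int) (xs : List Int) :
    get_score (generate_answer p (xs.length : Int)) xs = (scoreA p xs 0 : Nat) := by
  unfold get_score
  rw [generate_answer_eq, countA_eq_scoreA]

-- B's triple-counter fold, generalized
theorem foldB_eq (xs : List Int) : ∀ (k : Nat) (c : Int × Int × Int),
    (PySem.List.enumerate xs (k : Int)).foldl
      (fun (c : Int × Int × Int) ia =>
        ((if ia.2 == PySem.List.pyGetD [1, 2, 3, 4, 5] (PySem.Int.mod ia.1 5) 0 then c.1 + 1 else c.1),
         (if ia.2 == PySem.List.pyGetD [2, 1, 2, 3, 2, 4, 2, 5] (PySem.Int.mod ia.1 8) 0 then c.2.1 + 1 else c.2.1),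
         (if ia.2 == PySem.List.pyGetD [3, 3, 1, 1, 2, 2, 4, 4, 5, 5] (PySem.Int.mod ia.1 10) 0 then c.2.2 + 1 else c.2.2)))
      c
    = (c.1 + (scoreA [1, 2, 3, 4, 5] xs k : Nat),
       c.2.1 + (scoreA [2, 1, 2, 3, 2, 4, 2, 5] xs k : Nat),
       c.2.2 + (scoreA [3, 3, 1, 1, 2, 2, 4, 4, 5, 5] xs k : Nat)) := by
  induction xs with
  | nil => intro k c; simp [scoreA]
  | cons a t ih =>
    intro k c
    rw [PySem.List.enumerate_cons, List.foldl_cons]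
    have h1 : ((k : Int) + 1) = ((k + 1 : Nat) : Int) := by push_cast; ring
    rw [h1, ih]
    simp only [scoreA]
    have e5 : PySem.Int.mod (k : Int) 5 = ((k % 5 : Nat) : Int) := by
      have := PySem.Int.mod_natCast k 5; push_cast at this ⊢; omega
    have e8 : PySem.Int.mod (k : Int) 8 = ((k % 8 : Nat) : Int) := by
      have := PySem.Int.mod_natCast k 8; push_cast at this ⊢; omega
    have e10 : PySem.Int.mod (k : Int) 10 = ((k % 10 : Nat) : Int) := by
      have := PySem.Int.mod_natCast k 10; push_cast at this ⊢; omega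
    rw [e5, e8, e10]
    simp only [List.length_cons, List.length_nil]
    split_ifs <;> push_cast <;> refine Prod.ext ?_ (Prod.ext ?_ ?_) <;> simp <;> ring

theorem max?_three (a b c : Int) : (([a, b, c] : List Int).max?).getD 0 = max a (max b c) := by
  simp [List.max?, max_assoc]

theorem final_list (s1 s2 s3 m : Int) :
    ((([((1 : Int), s1), (2, s2), (3, s3)]).filter (fun iv => iv.2 == m)).map (·.1))
      = (if s1 == m then ([1] : List Int) else []) ++ (if s2 == m then [2] else []) ++
        (if s3 == m then [3] else []) := by
  by_cases h1 : s1 = m <;> by_cases h2 : s2 = m <;> by_cases h3 : s3 = m <;>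
    simp [h1, h2, h3]

-- ===== VERDICT (by name: the statement is the Claim_ definition above) =====
theorem solution_spec : Claim_equal_solution := by
  intro answers _
  unfold Spec_solution solution solution_alt
  simp only [List.map_cons, List.map_nil, get_score_eq]
  have hb := foldB_eq answers 0 (0, 0, 0)
  simp only [Nat.cast_zero, zero_add] at hb
  rw [hb]
  simp only [max?_three, final_list]
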